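-- pv_equiv track=rewrite | github.com/corben15/hamiltonianPaths | enumerate_3_by_3.py | generate_start_list
-- ===== SOURCE A (Python) =====
-- import math
--
-- def generate_start_list(n=3):
--     half_n = math.ceil(n/2)
--     startList = []
--     startIndex = 0
--     endIndex = half_n
--     rowlength = half_n
--     for i in range(half_n):
--         for j in range(rowlength):
--             startList.append(startIndex + j)
--         endIndex = endIndex + n
--         rowlength -= 1
--         startIndex = endIndex - rowlength
--     return startList
-- ===== SOURCE B (Python) =====
-- import math
--
-- def generate_start_list(n=3):
--     # A start index is any m below half_n*(n+1) whose offset within its row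
--     # of the grid (m % (n+1)) is below that row's length (half_n - m // (n+1)).
--     half_n = math.ceil(n / 2)
--     d = n + 1
--     return [m for m in range(max(half_n, 0) * d) if m % d < half_n - m // d]
-- ===== Notes on version B (the rewrite author's own statement) =====
-- stated objective: alternative
-- what changed: Instead of emitting rows with nested loops over running accumulators, B scans the flat candidate range of length half_n*(n+1) once and keeps each m iff its in-row offset m % (n+1) is below its row's length half_n - m // (n+1), i.e. generate-and-test by div/mod arithmetic.
import Mathlib
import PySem

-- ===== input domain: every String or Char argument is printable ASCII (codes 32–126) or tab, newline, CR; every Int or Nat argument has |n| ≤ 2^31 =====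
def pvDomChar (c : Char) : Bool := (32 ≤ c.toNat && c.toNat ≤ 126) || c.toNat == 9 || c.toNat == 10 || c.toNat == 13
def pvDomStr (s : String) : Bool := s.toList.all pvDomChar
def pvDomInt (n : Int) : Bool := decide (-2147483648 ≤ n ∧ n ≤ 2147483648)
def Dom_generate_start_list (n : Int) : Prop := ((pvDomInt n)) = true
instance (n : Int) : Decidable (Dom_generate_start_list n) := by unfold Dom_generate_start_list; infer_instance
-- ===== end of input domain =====

-- B replaces A's accumulator-threaded nested row loops by one flat scan of the
-- candidate range with a div/mod membership test; objective: alternative (not faster).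


-- ===== PORT A =====
def generate_start_list (n : Int) : List Int :=
  -- math.ceil(n/2) = (n+1) floor-div 2; exact on the domain (|n| ≤ 2^31 is float-exact)
  let half_n := PySem.Int.floordiv (n + 1) 2
  let s := (PySem.List.pyRange 0 half_n 1).foldl
    (fun (s : List Int × Int × Int × Int) _i =>
      let startList := (PySem.List.pyRange 0 s.2.2.2 1).foldl
        (fun acc j => acc ++ [s.2.1 + j]) s.1
      let endIndex := s.2.2.1 + n
      let rowlength := s.2.2.2 - 1
      let startIndex := endIndex - rowlength
      (startList, startIndex, endIndex, rowlength))
    ([], 0, half_n, half_n)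
  s.1

-- ===== PORT B =====
def generate_start_list_alt (n : Int) : List Int :=
  let half_n := PySem.Int.floordiv (n + 1) 2
  let d := n + 1
  (PySem.List.pyRange 0 (max half_n 0 * d) 1).filter
    (fun m => decide (PySem.Int.mod m d < half_n - PySem.Int.floordiv m d))

-- ===== PRECONDITION & SPEC =====
def Spec_generate_start_list (n : Int) (out : List Int) : Prop := out = generate_start_list_alt n
instance (n : Int) (out : List Int) : Decidable (Spec_generate_start_list n out) := by unfold Spec_generate_start_list; infer_instance

-- ===== CLAIM (what is proved, stated in full; the proofs are below) =====
def Claim_equal_generate_start_list : Prop := ∀ (n : Int), Dom_generate_start_list n → Spec_generate_start_list n (generate_start_list n)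

-- ===== LEMMAS AND PROOFS =====

-- A-side invariant: from the state reached after k iterations, the remaining loop
-- appends exactly the closed-form rows for i ∈ [k, h).
theorem gsl_loop_inv (n h : Int) (k : Int) (hk : 0 ≤ k) (acc : List Int) :
    ((PySem.List.pyRange k h 1).foldl
      (fun (s : List Int × Int × Int × Int) _i =>
        let startList := (PySem.List.pyRange 0 s.2.2.2 1).foldl
          (fun acc j => acc ++ [s.2.1 + j]) s.1
        let endIndex := s.2.2.1 + n
        let rowlength := s.2.2.2 - 1
        let startIndex := endIndex - rowlength
        (startList, startIndex, endIndex, rowlength))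
      (acc, k * (n + 1), h + k * n, h - k)).1
    = acc ++ (PySem.List.pyRange k h 1).flatMap
        (fun i => (PySem.List.pyRange 0 (h - i) 1).map (fun j => i * (n + 1) + j)) := by
  by_cases hkh : k < h
  · have hlt : (h - (k + 1)).toNat < (h - k).toNat := by omega
    rw [PySem.List.pyRange_one_cons hkh]
    simp only [List.foldl_cons, List.flatMap_cons]
    have hrow : (PySem.List.pyRange 0 (h - k) 1).foldl
        (fun acc j => acc ++ [k * (n + 1) + j]) acc
        = acc ++ (PySem.List.pyRange 0 (h - k) 1).map (fun j => k * (n + 1) + j) :=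
      PySem.List.foldl_append_singleton_eq_map _ _ _
    have hstep := gsl_loop_inv n h (k + 1) (by omega)
      (acc ++ (PySem.List.pyRange 0 (h - k) 1).map (fun j => k * (n + 1) + j))
    simp only at hrow hstep ⊢
    rw [hrow]
    have e1 : h + k * n + n - (h - k - 1) = (k + 1) * (n + 1) := by ring
    have e2 : h + k * n + n = h + (k + 1) * n := by ring
    have e3 : h - k - 1 = h - (k + 1) := by ring
    rw [e1, e2, e3, hstep, List.append_assoc]
  · rw [PySem.List.pyRange_one_eq_nil (by omega)]
    simp
termination_by (h - k).toNat

-- filtering an increasing range by 'm < c' keeps a prefix range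
theorem filter_lt_pyRange (a b c : Int) :
    (PySem.List.pyRange a b 1).filter (fun m => decide (m < c))
      = PySem.List.pyRange a (min b c) 1 := by
  by_cases hab : a < b
  · rw [PySem.List.pyRange_one_cons hab, List.filter_cons]
    by_cases hac : a < c
    · simp only [hac, decide_true, if_true]
      rw [filter_lt_pyRange (a + 1) b c,
        PySem.List.pyRange_one_cons (show a < min b c by omega)]
    · simp only [hac, decide_false, Bool.false_eq_true, if_false]
      rw [filter_lt_pyRange (a + 1) b c]
      have h1 : min b c ≤ a + 1 := by omega
      have h2 : min b c ≤ a := by omega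
      rw [PySem.List.pyRange_one_eq_nil h1, PySem.List.pyRange_one_eq_nil h2]
  · rw [PySem.List.pyRange_one_eq_nil (by omega),
      PySem.List.pyRange_one_eq_nil (show min b c ≤ a by omega)]
    rfl
termination_by (b - a).toNat
decreasing_by all_goals simp; omega

-- B-side invariant: filtering the candidate block [k*d, h*d) yields the rows for i ∈ [k, h).
theorem gsl_filter_inv (n h k : Int) (hn : 1 ≤ n) (hh : h = PySem.Int.floordiv (n + 1) 2)
    (hk : 0 ≤ k) (hkh : k ≤ h) :
    (PySem.List.pyRange (k * (n + 1)) (h * (n + 1)) 1).filter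
      (fun m => decide (PySem.Int.mod m (n + 1) < h - PySem.Int.floordiv m (n + 1)))
    = (PySem.List.pyRange k h 1).flatMap
        (fun i => (PySem.List.pyRange 0 (h - i) 1).map (fun j => i * (n + 1) + j)) := by
  have hd : (0:Int) < n + 1 := by omega
  have hhd : h ≤ n + 1 := by
    rw [hh, PySem.Int.floordiv_eq_ediv_of_pos (by omega)]; omega
  by_cases hlt : k < h
  · have hterm : (h - (k + 1)).toNat < (h - k).toNat := by omega
    have hsplit : PySem.List.pyRange (k * (n + 1)) (h * (n + 1)) 1
        = PySem.List.pyRange (k * (n + 1)) ((k + 1) * (n + 1)) 1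
          ++ PySem.List.pyRange ((k + 1) * (n + 1)) (h * (n + 1)) 1 :=
      PySem.List.pyRange_one_append _ _ _ (by nlinarith) (by nlinarith)
    rw [hsplit, List.filter_append]
    -- on the first block, floordiv m (n+1) = k and mod m (n+1) = m - k*(n+1)
    have hblock : (PySem.List.pyRange (k * (n + 1)) ((k + 1) * (n + 1)) 1).filter
        (fun m => decide (PySem.Int.mod m (n + 1) < h - PySem.Int.floordiv m (n + 1)))
        = (PySem.List.pyRange (k * (n + 1)) ((k + 1) * (n + 1)) 1).filter
            (fun m => decide (m < k * (n + 1) + (h - k))) := by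
      apply List.filter_congr
      intro m hm
      rw [PySem.List.mem_pyRange_one] at hm
      have hfd : PySem.Int.floordiv m (n + 1) = k := by
        rw [PySem.Int.floordiv_eq_iff_of_pos hd]; exact ⟨hm.1, hm.2⟩
      have hmod : PySem.Int.mod m (n + 1) = m - k * (n + 1) := by
        have := PySem.Int.floordiv_mul_add_mod m (n + 1)
        rw [hfd] at this; omega
      rw [hfd, hmod]
      simp only [decide_eq_decide]
      omega
    rw [hblock, filter_lt_pyRange]
    have hle2 : k * (n + 1) + (h - k) ≤ (k + 1) * (n + 1) := by nlinarith
    rw [min_eq_right hle2]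
    rw [PySem.List.pyRange_one_cons hlt, List.flatMap_cons]
    rw [gsl_filter_inv n h (k + 1) hn hh (by omega) (by omega)]
    congr 1
    -- row as a shifted range
    rw [PySem.List.pyRange_one, PySem.List.pyRange_one]
    simp only [Int.sub_zero, List.map_map]
    have : k * (n + 1) + (h - k) - k * (n + 1) = h - k := by ring
    rw [this]
    apply List.map_congr_left
    intro x _
    simp [Int.add_comm]
  · have hk' : k = h := by omega
    subst hk'
    rw [PySem.List.pyRange_one_eq_nil (le_refl _), PySem.List.pyRange_one_eq_nil (le_refl _)]
    rfl
termination_by (h - k).toNat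

theorem generate_start_list_eq (n : Int) :
    generate_start_list n = generate_start_list_alt n := by
  unfold generate_start_list generate_start_list_alt
  have hA := gsl_loop_inv n (PySem.Int.floordiv (n + 1) 2) 0 le_rfl []
  simp only [Int.zero_mul, Int.add_zero, Int.sub_zero, List.nil_append] at hA ⊢
  rw [hA]
  set h := PySem.Int.floordiv (n + 1) 2 with hh
  by_cases hpos : 1 ≤ n
  · have hh1 : (1:Int) ≤ h := by
      rw [hh, PySem.Int.floordiv_eq_ediv_of_pos (by omega)]; omega
    have hmax : max h 0 = h := by omega
    rw [hmax]
    have hB := gsl_filter_inv n h 0 hpos hh le_rfl (by omega)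
    simp only [Int.zero_mul] at hB
    exact hB.symm
  · have hle : h ≤ 0 := by
      rw [hh, PySem.Int.floordiv_eq_ediv_of_pos (by omega)]; omega
    have hmax : max h 0 = 0 := by omega
    rw [hmax, PySem.List.pyRange_one_eq_nil hle, Int.zero_mul,
      PySem.List.pyRange_one_eq_nil (le_refl 0)]
    rfl

-- ===== VERDICT (by name: the statement is the Claim_ definition above) =====
theorem generate_start_list_spec : Claim_equal_generate_start_list := by
  intro n _
  exact generate_start_list_eq n
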